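-- pv_equiv track=rewrite | github.com/FlickerLogicalStack/VKLongPollWrapper | __init__.py | _cast_flags
-- ===== SOURCE A (Python) =====
-- from collections import defaultdict
--
-- def _cast_flags(flag, is_community=False):
-- 	if is_community:
-- 		q = defaultdict(lambda: None,
-- 			{
-- 				1: "IMPORTANT",
-- 				2: "UNANSWERED",
-- 			})
-- 	else:
-- 		q = defaultdict(lambda: None,
-- 			{
-- 				1: "UNREAD",
-- 				2: "OUTBOX",
-- 				4: "REPLIED",
-- 				8: "IMPORTANT",
-- 				16: "CHAT",
-- 				32: "FRIENDS",
-- 				64: "SPAM",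
-- 				128: "DELЕTЕD",
-- 				256: "FIXED",
-- 				512: "MEDIA",
-- 				65536: "HIDDEN"
-- 			})
--
-- 	out = [q[2**int(i)] for i in range(len(bin(flag)[2:][::-1])) if (bin(flag)[2:][::-1][i] == "1" and q[2**int(i)])]
--
-- 	return out
-- ===== SOURCE B (Python) =====
-- def _cast_flags(flag, is_community=False):
-- 	if is_community:
-- 		table = {
-- 			1: "IMPORTANT",
-- 			2: "UNANSWERED",
-- 		}
-- 	else:
-- 		table = {
-- 			1: "UNREAD",
-- 			2: "OUTBOX",
-- 			4: "REPLIED",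
-- 			8: "IMPORTANT",
-- 			16: "CHAT",
-- 			32: "FRIENDS",
-- 			64: "SPAM",
-- 			128: "DEL\u0415T\u0415D",
-- 			256: "FIXED",
-- 			512: "MEDIA",
-- 			65536: "HIDDEN"
-- 		}
-- 	bits = abs(flag)  # bin(flag) encodes the magnitude (sign-and-magnitude)
-- 	return [label for bit, label in table.items() if bits & bit]
-- ===== Notes on version B (the rewrite author's own statement) =====
-- stated objective: idiomatic
-- what changed: B replaces A's parse of the reversed bin() string (indexing characters and looking up 2**i in a defaultdict) by a direct bitmask test flag&bit over the flag table's items; abs mirrors bin()'s sign-and-magnitude reading of negative flags.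
import Mathlib
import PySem

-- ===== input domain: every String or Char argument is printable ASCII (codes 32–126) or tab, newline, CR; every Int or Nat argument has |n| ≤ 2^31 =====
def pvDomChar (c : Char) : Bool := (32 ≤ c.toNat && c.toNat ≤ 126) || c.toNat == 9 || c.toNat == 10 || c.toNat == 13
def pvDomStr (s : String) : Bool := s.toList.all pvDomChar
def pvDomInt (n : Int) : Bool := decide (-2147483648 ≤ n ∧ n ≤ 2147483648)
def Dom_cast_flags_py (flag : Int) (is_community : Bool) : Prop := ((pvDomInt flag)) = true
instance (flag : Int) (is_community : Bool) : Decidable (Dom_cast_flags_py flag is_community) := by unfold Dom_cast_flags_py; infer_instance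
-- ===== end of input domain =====

-- B decodes the flag by testing |flag| & bit against each table entry instead of parsing the
-- reversed bin() string character by character (idiomatic; same output, including label order).

-- ===== PORT A =====

-- binary digits of n, least-significant bit first ([] for 0); helper for Python's bin()
def pvBitsLSB (n : Nat) : List Char :=
  if n = 0 then [] else (if n % 2 = 1 then '1' else '0') :: pvBitsLSB (n / 2)

-- bin(flag) as a list of characters (Python's bin(): '-' sign, '0b' prefix, magnitude MSB-first)
def pvBin (flag : Int) : List Char :=
  (if flag < 0 then ['-'] else []) ++ ['0', 'b'] ++
    (if flag = 0 then ['0'] else (pvBitsLSB flag.natAbs).reverse)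

-- the defaultdict q (default None ≙ Dict.get? returning none)
def pvDictA (is_community : Bool) : PySem.Dict Int String :=
  PySem.Dict.ofList (if is_community then
    [(1, "IMPORTANT"), (2, "UNANSWERED")]
  else
    [(1, "UNREAD"), (2, "OUTBOX"), (4, "REPLIED"), (8, "IMPORTANT"), (16, "CHAT"),
     (32, "FRIENDS"), (64, "SPAM"), (128, "DEL\u0415T\u0415D"), (256, "FIXED"),
     (512, "MEDIA"), (65536, "HIDDEN")])

-- [q[2**int(i)] for i in range(len(bin(flag)[2:][::-1])) if (bin(flag)[2:][::-1][i] == "1" and q[2**int(i)])]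
-- (bin(flag)[2:][::-1] inlined at each of its occurrences, as in the Python source;
--  [::-1] is list reversal, PySem.List.slice?_none_none_neg_one)
def cast_flags_py (flag : Int) (is_community : Bool) : List String :=
  (PySem.List.pyRange 0 ((((pvBin flag).drop 2).reverse).length : Int) 1).filterMap (fun i =>
    match (pvDictA is_community).get? (2 ^ i.toNat) with
    | none => none
    | some lab =>
      if PySem.List.pyGet? (((pvBin flag).drop 2).reverse) i = some '1' ∧ lab ≠ "" then some lab
      else none)

-- ===== PORT B =====

-- the flag table (dict literal as association list, iterated via .items() in insertion order)
def pvTable (is_community : Bool) : List (Int × String) :=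
  if is_community then
    [(1, "IMPORTANT"), (2, "UNANSWERED")]
  else
    [(1, "UNREAD"), (2, "OUTBOX"), (4, "REPLIED"), (8, "IMPORTANT"), (16, "CHAT"),
     (32, "FRIENDS"), (64, "SPAM"), (128, "DEL\u0415T\u0415D"), (256, "FIXED"),
     (512, "MEDIA"), (65536, "HIDDEN")]

def cast_flags_py_alt (flag : Int) (is_community : Bool) : List String :=
  let bits : Int := |flag|
  (pvTable is_community).filterMap (fun p => if Int.land bits p.1 ≠ 0 then some p.2 else none)

-- ===== PRECONDITION & SPEC =====
def Spec_cast_flags_py (flag : Int) (is_community : Bool) (out : List String) : Prop := out = cast_flags_py_alt flag is_community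
instance (flag : Int) (is_community : Bool) (out : List String) : Decidable (Spec_cast_flags_py flag is_community out) := by unfold Spec_cast_flags_py; infer_instance

-- ===== CLAIM (what is proved, stated in full; the proofs are below) =====
def Claim_equal_cast_flags_py : Prop := ∀ (flag : Int) (is_community : Bool), Dom_cast_flags_py flag is_community → Spec_cast_flags_py flag is_community (cast_flags_py flag is_community)

-- ===== LEMMAS AND PROOFS =====

-- the i-th character (LSB first) of the binary digits of n is '1' iff bit i of n is set
theorem pv_bitsLSB_spec (n : Nat) (i : Nat) :
    ((pvBitsLSB n)[i]? = some '1') ↔ n.testBit i := by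
  fun_induction pvBitsLSB n generalizing i with
  | case1 => simp [Nat.zero_testBit]
  | case2 n hn ih =>
    cases i with
    | zero =>
      simp only [List.getElem?_cons_zero, Nat.testBit_zero]
      split_ifs with h <;> simp [h]
    | succ i =>
      simp only [List.getElem?_cons_succ, Nat.testBit_succ]
      exact ih i

-- the k-th character of bin(flag)[2:][::-1] is '1' iff bit k of |flag| is set
theorem pv_s_spec (flag : Int) (k : Nat) :
    (((((pvBin flag).drop 2).reverse))[k]? = some '1') ↔ flag.natAbs.testBit k := by
  unfold pvBin
  rcases lt_trichotomy flag 0 with hneg | rfl | hpos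
  · have hne : flag ≠ 0 := by omega
    simp only [if_pos hneg, if_neg hne, List.cons_append, List.nil_append,
      List.drop_succ_cons, List.drop_zero, List.reverse_cons, List.reverse_reverse]
    rcases lt_or_ge k (pvBitsLSB flag.natAbs).length with hk | hk
    · rw [List.getElem?_append_left hk]
      exact pv_bitsLSB_spec _ _
    · rw [List.getElem?_append_right hk]
      have ht : flag.natAbs.testBit k = false := by
        have h2 := pv_bitsLSB_spec flag.natAbs k
        rw [List.getElem?_eq_none hk] at h2
        simpa using h2.symm
      rw [ht]
      cases hj : k - (pvBitsLSB flag.natAbs).length <;> simp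
  · cases k <;> simp [Nat.zero_testBit]
  · have h1 : ¬ flag < 0 := by omega
    have h2 : flag ≠ 0 := by omega
    simp only [if_neg h1, if_neg h2, List.nil_append, List.cons_append,
      List.drop_succ_cons, List.drop_zero, List.reverse_reverse]
    exact pv_bitsLSB_spec _ _

-- the loop body of port A as a function of the bit position
def pvG (ic : Bool) (m : Nat) (k : Nat) : Option String :=
  match (pvDictA ic).get? (2 ^ k) with
  | none => none
  | some lab => if m.testBit k ∧ lab ≠ "" then some lab else none

-- a filterMap over range L can be truncated where the function is none from K on
theorem pv_trunc {β : Type} (g : Nat → Option β) (K : Nat) (hg : ∀ i, K ≤ i → g i = none)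
    (L : Nat) : (List.range L).filterMap g = (List.range (min L K)).filterMap g := by
  induction L with
  | zero => simp
  | succ L ih =>
    rcases Nat.lt_or_ge L K with h | h
    · rw [min_eq_left (by omega)]
    · have e1 : min (L + 1) K = K := min_eq_right (by omega)
      have e2 : min L K = K := min_eq_right h
      rw [List.range_succ, List.filterMap_append, e1, ← e2, ← ih]
      simp [List.filterMap_cons, hg L h]

theorem pv_land (m k : Nat) : (Int.land (↑m) ((2 : Int) ^ k) ≠ 0) ↔ m.testBit k = true := by
  have h2 : ((2 : Int) ^ k) = ((2 ^ k : Nat) : Int) := by push_cast; ring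
  have h3 : Int.land (↑m) ((2 ^ k : Nat) : Int) = ((m &&& 2 ^ k : Nat) : Int) := rfl
  rw [h2, h3, Nat.and_two_pow]
  cases h : m.testBit k <;> simp [h]

theorem pv_land' (m : Nat) (c : Int) (k : Nat) (hc : c = 2 ^ k) :
    (¬ Int.land (↑m) c = 0) ↔ m.testBit k = true := by
  subst hc; exact pv_land m k

theorem pv_dict_none (ic : Bool) (k : Nat) (hk : 17 ≤ k) :
    (pvDictA ic).get? ((2 : Int) ^ k) = none := by
  have h1 : (65536 : Int) < 2 ^ k :=
    lt_of_lt_of_le (by norm_num) (pow_le_pow_right₀ (by norm_num) hk)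
  revert h1
  generalize (2 : Int) ^ k = x
  intro h1
  cases ic
  · have hit : (pvDictA false).items =
        [((1 : Int), "UNREAD"), (2, "OUTBOX"), (4, "REPLIED"), (8, "IMPORTANT"), (16, "CHAT"),
         (32, "FRIENDS"), (64, "SPAM"), (128, "DEL\u0415T\u0415D"), (256, "FIXED"),
         (512, "MEDIA"), (65536, "HIDDEN")] := by decide
    simp only [PySem.Dict.get?, hit]
    rw [List.find?_eq_none.2]
    · rfl
    · intro p hp
      fin_cases hp <;> simp <;> omega
  · have hit : (pvDictA true).items = [((1 : Int), "IMPORTANT"), (2, "UNANSWERED")] := by decide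
    simp only [PySem.Dict.get?, hit]
    rw [List.find?_eq_none.2]
    · rfl
    · intro p hp
      fin_cases hp <;> simp <;> omega

-- port A's comprehension is the filterMap of pvG over the bit positions of the binary string
theorem pv_A_eq (flag : Int) (ic : Bool) :
    cast_flags_py flag ic =
      (List.range ((((pvBin flag).drop 2).reverse).length)).filterMap (pvG ic flag.natAbs) := by
  unfold cast_flags_py
  rw [PySem.List.pyRange_one]
  simp only [Int.sub_zero, Int.toNat_natCast, List.filterMap_map]
  apply List.filterMap_congr
  intro k hk
  simp only [Function.comp_apply, zero_add, Int.toNat_natCast, PySem.List.pyGet?_natCast]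
  unfold pvG
  simp only [propext (pv_s_spec flag k)]

-- port B's loop body as a named function (zeta-reduced form of cast_flags_py_alt's body)
def pvF (flag : Int) : Int × String → Option String :=
  fun p => if Int.land |flag| p.1 ≠ 0 then some p.2 else none

theorem pv_fmc {α β : Type} (f : α → Option β) (a : α) (l : List α) (c : Prop) [Decidable c]
    (v : β) (h : f a = if c then some v else none) :
    (a :: l).filterMap f = if c then v :: l.filterMap f else l.filterMap f := by
  rw [List.filterMap_cons, h]
  split_ifs <;> rfl

theorem pv_fmn {α β : Type} (f : α → Option β) (a : α) (l : List α) (h : f a = none) :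
    (a :: l).filterMap f = l.filterMap f := by
  rw [List.filterMap_cons, h]

theorem pv_final (flag : Int) (ic : Bool) :
    (List.range 17).filterMap (pvG ic flag.natAbs) = cast_flags_py_alt flag ic := by
  have hr : List.range 17 = [0, 1, 2, 3, 4, 5, 6, 7, 8, 9, 10, 11, 12, 13, 14, 15, 16] := by decide
  cases ic
  · have hB : cast_flags_py_alt flag false = List.filterMap (pvF flag)
        [((1 : Int), "UNREAD"), ((2 : Int), "OUTBOX"), ((4 : Int), "REPLIED"), ((8 : Int), "IMPORTANT"), ((16 : Int), "CHAT"), ((32 : Int), "FRIENDS"), ((64 : Int), "SPAM"), ((128 : Int), "DEL\u0415T\u0415D"), ((256 : Int), "FIXED"), ((512 : Int), "MEDIA"), ((65536 : Int), "HIDDEN")] := rfl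
    rw [hr, hB]
    rw [pv_fmc (pvG false flag.natAbs) 0 [1, 2, 3, 4, 5, 6, 7, 8, 9, 10, 11, 12, 13, 14, 15, 16] (flag.natAbs.testBit 0 = true) "UNREAD"
      (by simp [pvG, show (pvDictA false).get? (1 : Int) = some "UNREAD" from by decide])]
    rw [pv_fmc (pvG false flag.natAbs) 1 [2, 3, 4, 5, 6, 7, 8, 9, 10, 11, 12, 13, 14, 15, 16] (flag.natAbs.testBit 1 = true) "OUTBOX"
      (by simp [pvG, show (pvDictA false).get? (2 : Int) = some "OUTBOX" from by decide])]
    rw [pv_fmc (pvG false flag.natAbs) 2 [3, 4, 5, 6, 7, 8, 9, 10, 11, 12, 13, 14, 15, 16] (flag.natAbs.testBit 2 = true) "REPLIED"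
      (by simp [pvG, show (pvDictA false).get? (4 : Int) = some "REPLIED" from by decide])]
    rw [pv_fmc (pvG false flag.natAbs) 3 [4, 5, 6, 7, 8, 9, 10, 11, 12, 13, 14, 15, 16] (flag.natAbs.testBit 3 = true) "IMPORTANT"
      (by simp [pvG, show (pvDictA false).get? (8 : Int) = some "IMPORTANT" from by decide])]
    rw [pv_fmc (pvG false flag.natAbs) 4 [5, 6, 7, 8, 9, 10, 11, 12, 13, 14, 15, 16] (flag.natAbs.testBit 4 = true) "CHAT"
      (by simp [pvG, show (pvDictA false).get? (16 : Int) = some "CHAT" from by decide])]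
    rw [pv_fmc (pvG false flag.natAbs) 5 [6, 7, 8, 9, 10, 11, 12, 13, 14, 15, 16] (flag.natAbs.testBit 5 = true) "FRIENDS"
      (by simp [pvG, show (pvDictA false).get? (32 : Int) = some "FRIENDS" from by decide])]
    rw [pv_fmc (pvG false flag.natAbs) 6 [7, 8, 9, 10, 11, 12, 13, 14, 15, 16] (flag.natAbs.testBit 6 = true) "SPAM"
      (by simp [pvG, show (pvDictA false).get? (64 : Int) = some "SPAM" from by decide])]
    rw [pv_fmc (pvG false flag.natAbs) 7 [8, 9, 10, 11, 12, 13, 14, 15, 16] (flag.natAbs.testBit 7 = true) "DEL\u0415T\u0415D"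
      (by simp [pvG, show (pvDictA false).get? (128 : Int) = some "DEL\u0415T\u0415D" from by decide])]
    rw [pv_fmc (pvG false flag.natAbs) 8 [9, 10, 11, 12, 13, 14, 15, 16] (flag.natAbs.testBit 8 = true) "FIXED"
      (by simp [pvG, show (pvDictA false).get? (256 : Int) = some "FIXED" from by decide])]
    rw [pv_fmc (pvG false flag.natAbs) 9 [10, 11, 12, 13, 14, 15, 16] (flag.natAbs.testBit 9 = true) "MEDIA"
      (by simp [pvG, show (pvDictA false).get? (512 : Int) = some "MEDIA" from by decide])]
    rw [pv_fmn (pvG false flag.natAbs) 10 [11, 12, 13, 14, 15, 16]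
      (by simp [pvG, show (pvDictA false).get? (1024 : Int) = none from by decide])]
    rw [pv_fmn (pvG false flag.natAbs) 11 [12, 13, 14, 15, 16]
      (by simp [pvG, show (pvDictA false).get? (2048 : Int) = none from by decide])]
    rw [pv_fmn (pvG false flag.natAbs) 12 [13, 14, 15, 16]
      (by simp [pvG, show (pvDictA false).get? (4096 : Int) = none from by decide])]
    rw [pv_fmn (pvG false flag.natAbs) 13 [14, 15, 16]
      (by simp [pvG, show (pvDictA false).get? (8192 : Int) = none from by decide])]
    rw [pv_fmn (pvG false flag.natAbs) 14 [15, 16]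
      (by simp [pvG, show (pvDictA false).get? (16384 : Int) = none from by decide])]
    rw [pv_fmn (pvG false flag.natAbs) 15 [16]
      (by simp [pvG, show (pvDictA false).get? (32768 : Int) = none from by decide])]
    rw [pv_fmc (pvG false flag.natAbs) 16 [] (flag.natAbs.testBit 16 = true) "HIDDEN"
      (by simp [pvG, show (pvDictA false).get? (65536 : Int) = some "HIDDEN" from by decide])]
    rw [pv_fmc (pvF flag) ((1 : Int), "UNREAD") [((2 : Int), "OUTBOX"), ((4 : Int), "REPLIED"), ((8 : Int), "IMPORTANT"), ((16 : Int), "CHAT"), ((32 : Int), "FRIENDS"), ((64 : Int), "SPAM"), ((128 : Int), "DEL\u0415T\u0415D"), ((256 : Int), "FIXED"), ((512 : Int), "MEDIA"), ((65536 : Int), "HIDDEN")] (flag.natAbs.testBit 0 = true) "UNREAD"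
      (by simp only [pvF, ne_eq, Int.abs_eq_natAbs, pv_land' flag.natAbs 1 0 (by norm_num)])]
    rw [pv_fmc (pvF flag) ((2 : Int), "OUTBOX") [((4 : Int), "REPLIED"), ((8 : Int), "IMPORTANT"), ((16 : Int), "CHAT"), ((32 : Int), "FRIENDS"), ((64 : Int), "SPAM"), ((128 : Int), "DEL\u0415T\u0415D"), ((256 : Int), "FIXED"), ((512 : Int), "MEDIA"), ((65536 : Int), "HIDDEN")] (flag.natAbs.testBit 1 = true) "OUTBOX"
      (by simp only [pvF, ne_eq, Int.abs_eq_natAbs, pv_land' flag.natAbs 2 1 (by norm_num)])]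
    rw [pv_fmc (pvF flag) ((4 : Int), "REPLIED") [((8 : Int), "IMPORTANT"), ((16 : Int), "CHAT"), ((32 : Int), "FRIENDS"), ((64 : Int), "SPAM"), ((128 : Int), "DEL\u0415T\u0415D"), ((256 : Int), "FIXED"), ((512 : Int), "MEDIA"), ((65536 : Int), "HIDDEN")] (flag.natAbs.testBit 2 = true) "REPLIED"
      (by simp only [pvF, ne_eq, Int.abs_eq_natAbs, pv_land' flag.natAbs 4 2 (by norm_num)])]
    rw [pv_fmc (pvF flag) ((8 : Int), "IMPORTANT") [((16 : Int), "CHAT"), ((32 : Int), "FRIENDS"), ((64 : Int), "SPAM"), ((128 : Int), "DEL\u0415T\u0415D"), ((256 : Int), "FIXED"), ((512 : Int), "MEDIA"), ((65536 : Int), "HIDDEN")] (flag.natAbs.testBit 3 = true) "IMPORTANT"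
      (by simp only [pvF, ne_eq, Int.abs_eq_natAbs, pv_land' flag.natAbs 8 3 (by norm_num)])]
    rw [pv_fmc (pvF flag) ((16 : Int), "CHAT") [((32 : Int), "FRIENDS"), ((64 : Int), "SPAM"), ((128 : Int), "DEL\u0415T\u0415D"), ((256 : Int), "FIXED"), ((512 : Int), "MEDIA"), ((65536 : Int), "HIDDEN")] (flag.natAbs.testBit 4 = true) "CHAT"
      (by simp only [pvF, ne_eq, Int.abs_eq_natAbs, pv_land' flag.natAbs 16 4 (by norm_num)])]
    rw [pv_fmc (pvF flag) ((32 : Int), "FRIENDS") [((64 : Int), "SPAM"), ((128 : Int), "DEL\u0415T\u0415D"), ((256 : Int), "FIXED"), ((512 : Int), "MEDIA"), ((65536 : Int), "HIDDEN")] (flag.natAbs.testBit 5 = true) "FRIENDS"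
      (by simp only [pvF, ne_eq, Int.abs_eq_natAbs, pv_land' flag.natAbs 32 5 (by norm_num)])]
    rw [pv_fmc (pvF flag) ((64 : Int), "SPAM") [((128 : Int), "DEL\u0415T\u0415D"), ((256 : Int), "FIXED"), ((512 : Int), "MEDIA"), ((65536 : Int), "HIDDEN")] (flag.natAbs.testBit 6 = true) "SPAM"
      (by simp only [pvF, ne_eq, Int.abs_eq_natAbs, pv_land' flag.natAbs 64 6 (by norm_num)])]
    rw [pv_fmc (pvF flag) ((128 : Int), "DEL\u0415T\u0415D") [((256 : Int), "FIXED"), ((512 : Int), "MEDIA"), ((65536 : Int), "HIDDEN")] (flag.natAbs.testBit 7 = true) "DEL\u0415T\u0415D"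
      (by simp only [pvF, ne_eq, Int.abs_eq_natAbs, pv_land' flag.natAbs 128 7 (by norm_num)])]
    rw [pv_fmc (pvF flag) ((256 : Int), "FIXED") [((512 : Int), "MEDIA"), ((65536 : Int), "HIDDEN")] (flag.natAbs.testBit 8 = true) "FIXED"
      (by simp only [pvF, ne_eq, Int.abs_eq_natAbs, pv_land' flag.natAbs 256 8 (by norm_num)])]
    rw [pv_fmc (pvF flag) ((512 : Int), "MEDIA") [((65536 : Int), "HIDDEN")] (flag.natAbs.testBit 9 = true) "MEDIA"
      (by simp only [pvF, ne_eq, Int.abs_eq_natAbs, pv_land' flag.natAbs 512 9 (by norm_num)])]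
    rw [pv_fmc (pvF flag) ((65536 : Int), "HIDDEN") [] (flag.natAbs.testBit 16 = true) "HIDDEN"
      (by simp only [pvF, ne_eq, Int.abs_eq_natAbs, pv_land' flag.natAbs 65536 16 (by norm_num)])]
    simp
  · have hB : cast_flags_py_alt flag true = List.filterMap (pvF flag)
        [((1 : Int), "IMPORTANT"), ((2 : Int), "UNANSWERED")] := rfl
    rw [hr, hB]
    rw [pv_fmc (pvG true flag.natAbs) 0 [1, 2, 3, 4, 5, 6, 7, 8, 9, 10, 11, 12, 13, 14, 15, 16] (flag.natAbs.testBit 0 = true) "IMPORTANT"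
      (by simp [pvG, show (pvDictA true).get? (1 : Int) = some "IMPORTANT" from by decide])]
    rw [pv_fmc (pvG true flag.natAbs) 1 [2, 3, 4, 5, 6, 7, 8, 9, 10, 11, 12, 13, 14, 15, 16] (flag.natAbs.testBit 1 = true) "UNANSWERED"
      (by simp [pvG, show (pvDictA true).get? (2 : Int) = some "UNANSWERED" from by decide])]
    rw [pv_fmn (pvG true flag.natAbs) 2 [3, 4, 5, 6, 7, 8, 9, 10, 11, 12, 13, 14, 15, 16]
      (by simp [pvG, show (pvDictA true).get? (4 : Int) = none from by decide])]
    rw [pv_fmn (pvG true flag.natAbs) 3 [4, 5, 6, 7, 8, 9, 10, 11, 12, 13, 14, 15, 16]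
      (by simp [pvG, show (pvDictA true).get? (8 : Int) = none from by decide])]
    rw [pv_fmn (pvG true flag.natAbs) 4 [5, 6, 7, 8, 9, 10, 11, 12, 13, 14, 15, 16]
      (by simp [pvG, show (pvDictA true).get? (16 : Int) = none from by decide])]
    rw [pv_fmn (pvG true flag.natAbs) 5 [6, 7, 8, 9, 10, 11, 12, 13, 14, 15, 16]
      (by simp [pvG, show (pvDictA true).get? (32 : Int) = none from by decide])]
    rw [pv_fmn (pvG true flag.natAbs) 6 [7, 8, 9, 10, 11, 12, 13, 14, 15, 16]
      (by simp [pvG, show (pvDictA true).get? (64 : Int) = none from by decide])]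
    rw [pv_fmn (pvG true flag.natAbs) 7 [8, 9, 10, 11, 12, 13, 14, 15, 16]
      (by simp [pvG, show (pvDictA true).get? (128 : Int) = none from by decide])]
    rw [pv_fmn (pvG true flag.natAbs) 8 [9, 10, 11, 12, 13, 14, 15, 16]
      (by simp [pvG, show (pvDictA true).get? (256 : Int) = none from by decide])]
    rw [pv_fmn (pvG true flag.natAbs) 9 [10, 11, 12, 13, 14, 15, 16]
      (by simp [pvG, show (pvDictA true).get? (512 : Int) = none from by decide])]
    rw [pv_fmn (pvG true flag.natAbs) 10 [11, 12, 13, 14, 15, 16]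
      (by simp [pvG, show (pvDictA true).get? (1024 : Int) = none from by decide])]
    rw [pv_fmn (pvG true flag.natAbs) 11 [12, 13, 14, 15, 16]
      (by simp [pvG, show (pvDictA true).get? (2048 : Int) = none from by decide])]
    rw [pv_fmn (pvG true flag.natAbs) 12 [13, 14, 15, 16]
      (by simp [pvG, show (pvDictA true).get? (4096 : Int) = none from by decide])]
    rw [pv_fmn (pvG true flag.natAbs) 13 [14, 15, 16]
      (by simp [pvG, show (pvDictA true).get? (8192 : Int) = none from by decide])]
    rw [pv_fmn (pvG true flag.natAbs) 14 [15, 16]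
      (by simp [pvG, show (pvDictA true).get? (16384 : Int) = none from by decide])]
    rw [pv_fmn (pvG true flag.natAbs) 15 [16]
      (by simp [pvG, show (pvDictA true).get? (32768 : Int) = none from by decide])]
    rw [pv_fmn (pvG true flag.natAbs) 16 []
      (by simp [pvG, show (pvDictA true).get? (65536 : Int) = none from by decide])]
    rw [pv_fmc (pvF flag) ((1 : Int), "IMPORTANT") [((2 : Int), "UNANSWERED")] (flag.natAbs.testBit 0 = true) "IMPORTANT"
      (by simp only [pvF, ne_eq, Int.abs_eq_natAbs, pv_land' flag.natAbs 1 0 (by norm_num)])]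
    rw [pv_fmc (pvF flag) ((2 : Int), "UNANSWERED") [] (flag.natAbs.testBit 1 = true) "UNANSWERED"
      (by simp only [pvF, ne_eq, Int.abs_eq_natAbs, pv_land' flag.natAbs 2 1 (by norm_num)])]
    simp

theorem pv_main (flag : Int) (ic : Bool) : cast_flags_py flag ic = cast_flags_py_alt flag ic := by
  rw [pv_A_eq]
  have h17 : ∀ i, 17 ≤ i → pvG ic flag.natAbs i = none := by
    intro i hi
    unfold pvG
    rw [pv_dict_none ic i hi]
  have hL : ∀ i, (((pvBin flag).drop 2).reverse).length ≤ i → pvG ic flag.natAbs i = none := by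
    intro i hi
    have ht : flag.natAbs.testBit i = false := by
      have h2 := pv_s_spec flag i
      rw [List.getElem?_eq_none hi] at h2
      simpa using h2.symm
    unfold pvG
    cases hq : (pvDictA ic).get? (2 ^ i) <;> simp [ht]
  rw [pv_trunc _ 17 h17]
  have h2 := pv_trunc (pvG ic flag.natAbs) ((((pvBin flag).drop 2).reverse).length) hL 17
  rw [Nat.min_comm] at h2
  rw [← h2]
  exact pv_final flag ic

-- ===== VERDICT (by name: the statement is the Claim_ definition above) =====
theorem cast_flags_py_spec : Claim_equal_cast_flags_py := by
  intro flag is_community _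
  unfold Spec_cast_flags_py
  exact pv_main flag is_community
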